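-- pv_equiv track=rewrite | github.com/MrBrantCode/unitest_baseline | mut_generate/mist_train_cf/cf_70779/solution.py | advanced_ordered_list
-- ===== SOURCE A (Python) =====
-- def advanced_ordered_list(word_list, ascending=False, min_length=0):
--     if not word_list:
--         return []
--
--     word_list = [''.join(sorted(word.lower())) for word in word_list if len(word) >= min_length]
--
--     anagram_dict = {}
--     for word in word_list:
--         if word in anagram_dict:
--             anagram_dict[word] += 1
--         else:
--             anagram_dict[word] = 1
--
--     word_list = [word for word, count in anagram_dict.items() if count > 1]
--
--     word_list.sort(reverse=not ascending)
--
--     return [''.join(sorted(word)) for word in word_list]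
-- ===== SOURCE B (Python) =====
-- def advanced_ordered_list(word_list, ascending=False, min_length=0):
--     # Normalize qualifying words, then sort and scan adjacent runs instead of
--     # counting with a dict: a run of length >= 2 contributes its value once.
--     normed = sorted(''.join(sorted(w.lower())) for w in word_list if len(w) >= min_length)
--     result = []
--     i = 0
--     n = len(normed)
--     while i < n:
--         j = i
--         while j < n and normed[j] == normed[i]:
--             j += 1
--         if j - i >= 2:
--             result.append(normed[i])
--         i = j
--     result.sort(reverse=not ascending)
--     return result
-- ===== Notes on version B (the rewrite author's own statement) =====
-- stated objective: simpler
-- what changed: Replaces the dict-based occurrence counting plus items filtering with sort-then-scan: the normalized words are sorted once and a single adjacent-run scan emits each value whose run has length >= 2, then the final reverse/ascending sort is applied as before.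
import Mathlib
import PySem

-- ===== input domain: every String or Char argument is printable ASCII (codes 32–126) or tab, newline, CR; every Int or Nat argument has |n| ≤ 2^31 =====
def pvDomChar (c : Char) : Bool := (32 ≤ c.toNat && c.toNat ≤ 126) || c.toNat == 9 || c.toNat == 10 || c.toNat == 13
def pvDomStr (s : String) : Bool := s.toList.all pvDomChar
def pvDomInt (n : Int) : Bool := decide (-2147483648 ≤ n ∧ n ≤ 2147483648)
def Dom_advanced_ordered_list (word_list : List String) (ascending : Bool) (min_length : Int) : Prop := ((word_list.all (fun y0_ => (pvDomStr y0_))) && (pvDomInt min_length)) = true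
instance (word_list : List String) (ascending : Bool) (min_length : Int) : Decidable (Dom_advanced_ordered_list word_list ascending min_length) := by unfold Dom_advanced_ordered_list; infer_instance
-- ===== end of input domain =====

-- B replaces A's dict-based counting by sort-then-scan over adjacent runs (objective: simpler).

-- ===== PORT A =====
-- ''.join(sorted(word.lower())) is ported as String.ofList of the Python-sorted char list (exact).
def advanced_ordered_list (word_list : List String) (ascending : Bool) (min_length : Int) : List String :=
  if word_list = [] then []
  else
    -- word_list = [''.join(sorted(word.lower())) for word in word_list if len(word) >= min_length]
    let wl1 := (word_list.filter (fun w => decide (min_length ≤ PySem.Str.len w))).map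
      (fun w => String.ofList (PySem.List.sorted (PySem.Str.lower w).toList (fun c => c) false))
    -- the counting loop: if word in dict: d[word] = d[word] + 1 else: d[word] = 1
    let d := wl1.foldl
      (fun d w => if d.contains w then d.insert w (d.getD w 0 + 1) else d.insert w 1)
      (PySem.Dict.empty : PySem.Dict String Int)
    -- [word for word, count in anagram_dict.items() if count > 1]
    let wl2 := (d.items.filter (fun p => decide (1 < p.2))).map Prod.fst
    -- word_list.sort(reverse=not ascending)
    let wl3 := PySem.List.sorted wl2 (fun x => x) (!ascending)
    -- return [''.join(sorted(word)) for word in word_list]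
    wl3.map (fun w => String.ofList (PySem.List.sorted w.toList (fun c => c) false))

-- ===== PORT B =====
-- the two-pointer run scan of Source B: the inner 'while normed[j] == normed[i]' is takeWhile/dropWhile
def pvGroupRuns (s : List String) : List String :=
  match s with
  | [] => []
  | x :: xs =>
    (if 2 ≤ (xs.takeWhile (fun y => y == x)).length + 1 then [x] else []) ++
      pvGroupRuns (xs.dropWhile (fun y => y == x))
termination_by s.length
decreasing_by
  simp only [List.length_cons]
  exact Nat.lt_succ_of_le ((List.dropWhile_sublist _).length_le)

def advanced_ordered_list_alt (word_list : List String) (ascending : Bool) (min_length : Int) : List String :=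
  let normed := PySem.List.sorted
    ((word_list.filter (fun w => decide (min_length ≤ PySem.Str.len w))).map
      (fun w => String.ofList (PySem.List.sorted (PySem.Str.lower w).toList (fun c => c) false)))
    (fun x => x) false
  let result := pvGroupRuns normed
  PySem.List.sorted result (fun x => x) (!ascending)

-- ===== PRECONDITION & SPEC =====
def Spec_advanced_ordered_list (word_list : List String) (ascending : Bool) (min_length : Int) (out : List String) : Prop := out = advanced_ordered_list_alt word_list ascending min_length
instance (word_list : List String) (ascending : Bool) (min_length : Int) (out : List String) : Decidable (Spec_advanced_ordered_list word_list ascending min_length out) := by unfold Spec_advanced_ordered_list; infer_instance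

-- ===== CLAIM (what is proved, stated in full; the proofs are below) =====
def Claim_equal_advanced_ordered_list : Prop := ∀ (word_list : List String) (ascending : Bool) (min_length : Int), Dom_advanced_ordered_list word_list ascending min_length → Spec_advanced_ordered_list word_list ascending min_length (advanced_ordered_list word_list ascending min_length)

-- ===== LEMMAS AND PROOFS =====

theorem pvGroupRuns_nil : pvGroupRuns [] = [] := by
  rw [pvGroupRuns.eq_def]

theorem pvGroupRuns_subset (s : List String) : ∀ v ∈ pvGroupRuns s, v ∈ s := by
  fun_induction pvGroupRuns s with
  | case1 => simp
  | case2 x xs ih =>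
    intro v hv
    rcases List.mem_append.mp hv with h1 | h2
    · have : v = x := by
        by_cases hc : 2 ≤ (xs.takeWhile (fun y => y == x)).length + 1 <;> simp [hc] at h1
        exact h1
      simp [this]
    · have := (List.dropWhile_sublist (l := xs) (fun y => y == x)).mem (ih v h2)
      simp [this]

-- x does not survive its own run: everything after dropWhile (== x) in a sorted list exceeds x
theorem pv_not_mem_dropWhile (x : String) (xs : List String)
    (hle : ∀ y ∈ xs, x ≤ y) (hp : xs.Pairwise (· ≤ ·)) :
    x ∉ xs.dropWhile (fun y => y == x) := by
  induction xs with
  | nil => simp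
  | cons a as ih =>
    by_cases ha : a = x
    · rw [List.dropWhile_cons_of_pos (by simp [ha])]
      exact ih (fun y hy => hle y (List.mem_cons_of_mem _ hy)) (List.pairwise_cons.mp hp).2
    · rw [List.dropWhile_cons_of_neg (by simp [ha])]
      intro hmem
      have hxa : x < a := lt_of_le_of_ne (hle a (List.mem_cons_self)) (Ne.symm ha)
      rcases List.mem_cons.mp hmem with h | h
      · exact ha h.symm
      · exact absurd ((List.pairwise_cons.mp hp).1 x h) (not_le.mpr hxa)

theorem pv_count_run (x : String) (xs : List String) (hx : (x :: xs).Pairwise (· ≤ ·)) :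
    (x :: xs).count x = (xs.takeWhile (fun y => y == x)).length + 1 := by
  obtain ⟨hle, hp⟩ := List.pairwise_cons.mp hx
  have hsplit : xs.takeWhile (fun y => y == x) ++ xs.dropWhile (fun y => y == x) = xs :=
    List.takeWhile_append_dropWhile
  have h1 : (xs.takeWhile (fun y => y == x)).count x = (xs.takeWhile (fun y => y == x)).length := by
    apply List.count_eq_length.mpr
    intro b hb
    have hb' := List.mem_takeWhile_imp hb
    simp only [beq_iff_eq] at hb'
    exact hb'.symm
  have h2 : (xs.dropWhile (fun y => y == x)).count x = 0 :=
    List.count_eq_zero.mpr (pv_not_mem_dropWhile x xs hle hp)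
  rw [List.count_cons_self]
  conv_lhs => rw [← hsplit]
  rw [List.count_append, h1, h2]

theorem pv_count_other (x v : String) (xs : List String) (hv : v ≠ x) :
    (x :: xs).count v = (xs.dropWhile (fun y => y == x)).count v := by
  have hsplit : xs.takeWhile (fun y => y == x) ++ xs.dropWhile (fun y => y == x) = xs :=
    List.takeWhile_append_dropWhile
  have h1 : (xs.takeWhile (fun y => y == x)).count v = 0 := by
    apply List.count_eq_zero.mpr
    intro hm
    have hm' := List.mem_takeWhile_imp hm
    simp only [beq_iff_eq] at hm'
    exact hv hm'
  rw [List.count_cons, if_neg (by simp only [beq_iff_eq]; exact fun h => hv h.symm)]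
  conv_lhs => rw [← hsplit]
  rw [List.count_append, h1]
  omega

theorem pvGroupRuns_mem (s : List String) (h : s.Pairwise (· ≤ ·)) (v : String) :
    v ∈ pvGroupRuns s ↔ 2 ≤ s.count v := by
  fun_induction pvGroupRuns s with
  | case1 => simp
  | case2 x xs ih =>
    obtain ⟨hle, hp⟩ := List.pairwise_cons.mp h
    have hrest : (xs.dropWhile (fun y => y == x)).Pairwise (· ≤ ·) :=
      hp.sublist (List.dropWhile_sublist _)
    rw [List.mem_append]
    by_cases hv : v = x
    · subst hv
      have hnot : v ∉ pvGroupRuns (xs.dropWhile (fun y => y == v)) := fun hm =>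
        pv_not_mem_dropWhile v xs hle hp (pvGroupRuns_subset _ v hm)
      rw [pv_count_run v xs h]
      by_cases hc : 2 ≤ (xs.takeWhile (fun y => y == v)).length + 1 <;>
        simp [hc, hnot]
    · have hnotif : v ∉ (if 2 ≤ (xs.takeWhile (fun y => y == x)).length + 1 then [x] else []) := by
        by_cases hc : 2 ≤ (xs.takeWhile (fun y => y == x)).length + 1 <;> simp [hc, hv]
      rw [pv_count_other x v xs hv]
      constructor
      · rintro (h1 | h2)
        · exact absurd h1 hnotif
        · exact (ih hrest).mp h2
      · intro hc
        exact Or.inr ((ih hrest).mpr hc)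

theorem pvGroupRuns_nodup (s : List String) (h : s.Pairwise (· ≤ ·)) : (pvGroupRuns s).Nodup := by
  fun_induction pvGroupRuns s with
  | case1 => simp
  | case2 x xs ih =>
    obtain ⟨hle, hp⟩ := List.pairwise_cons.mp h
    have hrest : (xs.dropWhile (fun y => y == x)).Pairwise (· ≤ ·) :=
      hp.sublist (List.dropWhile_sublist _)
    have hnot : x ∉ pvGroupRuns (xs.dropWhile (fun y => y == x)) := fun hm =>
      pv_not_mem_dropWhile x xs hle hp (pvGroupRuns_subset _ x hm)
    by_cases hc : 2 ≤ (xs.takeWhile (fun y => y == x)).length + 1 <;>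
      simp [hc, ih hrest, hnot]

-- sorting two nodup rearrangements of each other gives the same list, in either direction
theorem pv_sorted_congr_perm (xs ys : List String) (rev : Bool)
    (hx : xs.Nodup) (hp : xs.Perm ys) :
    PySem.List.sorted xs (fun x => x) rev = PySem.List.sorted ys (fun x => x) rev := by
  cases rev with
  | false => exact PySem.List.sorted_eq_sorted_of_perm xs ys _ (fun a b hab => hab) hp
  | true =>
    have h1 : (PySem.List.sorted xs (fun x => x) true).Perm xs := PySem.List.sorted_perm _ _ _
    have pw : (PySem.List.sorted xs (fun x => x) true).Pairwise (fun a b => b ≤ a) :=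
      PySem.List.sorted_pairwise_rev xs _
    have nz : (PySem.List.sorted xs (fun x => x) true).Nodup := h1.nodup_iff.mpr hx
    have strict : (PySem.List.sorted xs (fun x => x) true).Pairwise (fun a b => b < a) :=
      (pw.and nz).imp (fun hab => lt_of_le_of_ne hab.1 (Ne.symm hab.2))
    exact (PySem.List.sorted_rev_eq_of_perm_of_pairwise_gt ys _ _ (h1.trans hp) strict).symm

-- ===== VERDICT (by name: the statement is the Claim_ definition above) =====
theorem advanced_ordered_list_spec : Claim_equal_advanced_ordered_list := by
  intro wl asc ml _
  unfold Spec_advanced_ordered_list advanced_ordered_list advanced_ordered_list_alt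
  by_cases hw : wl = []
  · subst hw
    simp [PySem.List.sorted_eq_nil_iff]
    rw [show PySem.List.sorted ([] : List String) (fun x => x) false = [] from
      (PySem.List.sorted_eq_nil_iff _ _ _).mpr rfl, pvGroupRuns_nil]
  · rw [if_neg hw]
    simp only []
    set N := (wl.filter (fun w => decide (ml ≤ PySem.Str.len w))).map
      (fun w => String.ofList (PySem.List.sorted (PySem.Str.lower w).toList (fun c => c) false)) with hN
    have hstep : (fun (d : PySem.Dict String Int) w =>
        if d.contains w then d.insert w (d.getD w 0 + 1) else d.insert w 1) =
        (fun (d : PySem.Dict String Int) w => d.insert w (d.getD w 0 + 1)) := by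
      funext d w
      by_cases hc : d.contains w
      · simp [hc]
      · rw [if_neg (by simp [hc]), PySem.Dict.getD_of_not_contains _ _ (by simpa using hc)]
        norm_num
    rw [hstep, PySem.Dict.foldl_insert_getD_add_one_eq_counter, PySem.Dict.items_counter,
      List.filter_map, List.map_map]
    have hcomp : (Prod.fst ∘ fun k => (k, (N.count k : Int))) = id := rfl
    rw [hcomp, List.map_id]
    set LA := (PySem.Set.ofList N).filter
      ((fun p => decide (1 < p.2)) ∘ fun k => (k, (N.count k : Int))) with hLA
    set S := PySem.List.sorted N (fun x => x) false with hS
    have hSpw : S.Pairwise (· ≤ ·) := PySem.List.sorted_pairwise N (fun x => x)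
    have hSnd : (pvGroupRuns S).Nodup := pvGroupRuns_nodup S hSpw
    have hLAnd : LA.Nodup := (PySem.Set.nodup_ofList N).filter _
    have hperm : LA.Perm (pvGroupRuns S) := by
      rw [List.perm_ext_iff_of_nodup hLAnd hSnd]
      intro v
      rw [pvGroupRuns_mem S hSpw v, List.mem_filter, PySem.Set.mem_ofList]
      have hcnt : S.count v = N.count v := (PySem.List.sorted_perm N (fun x => x) false).count_eq v
      rw [hcnt]
      simp only [Function.comp, decide_eq_true_eq]
      constructor
      · rintro ⟨hmem, hlt⟩
        have h1 : 1 < N.count v := by exact_mod_cast hlt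
        omega
      · intro h2
        have hpos : 0 < N.count v := by omega
        have h1 : 1 < N.count v := by omega
        exact ⟨List.count_pos_iff.mp hpos, by exact_mod_cast h1⟩
    have hmapid : ∀ w ∈ PySem.List.sorted LA (fun x => x) (!asc),
        String.ofList (PySem.List.sorted w.toList (fun c => c) false) = w := by
      intro w hw'
      have hwN : w ∈ N := PySem.Set.mem_ofList N w |>.mp
        (List.mem_filter.mp ((PySem.List.mem_sorted _ _ _ _).mp hw')).1
      rw [hN] at hwN
      obtain ⟨u, _, rfl⟩ := List.mem_map.mp hwN
      rw [String.toList_ofList, PySem.List.sorted_sorted]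
    rw [List.map_congr_left hmapid, List.map_id']
    exact pv_sorted_congr_perm LA (pvGroupRuns S) (!asc) hLAnd hperm
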